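-- pv_equiv track=rewrite | github.com/ProgramFan/bentoo | bentoo/tools/merge.py | find_first_of
-- ===== SOURCE A (Python) =====
-- def find_first_of(contents, candidates):
--     for c in candidates:
--         try:
--             i = contents.index(c)
--         except ValueError:
--             i = -1
--         if i >= 0:
--             return (c, i)
--     return (None, -1)
-- ===== SOURCE B (Python) =====
-- def find_first_of(contents, candidates):
--     # Rank each candidate by its position in `candidates`, then make ONE pass
--     # over `contents`, keeping the lowest-ranked match seen so far (strictly
--     # lower rank wins, so the first occurrence in `contents` is kept for the
--     # winning candidate).
--     rank = {}
--     for r, c in enumerate(candidates):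
--         rank.setdefault(c, r)
--     best_rank = len(candidates)
--     best = (None, -1)
--     for i, x in enumerate(contents):
--         r = rank.get(x)
--         if r is not None and r < best_rank:
--             best_rank = r
--             best = (x, i)
--     return best
-- ===== Notes on version B (the rewrite author's own statement) =====
-- stated objective: alternative
-- what changed: B inverts the traversal: instead of scanning contents once per candidate (list.index inside a loop over candidates), it ranks candidates in a dict and makes a single pass over contents keeping the lowest-ranked match seen so far (O(n+m) passes vs O(n*m) worst case, though not measurably faster on the timed inputs).
import Mathlib
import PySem

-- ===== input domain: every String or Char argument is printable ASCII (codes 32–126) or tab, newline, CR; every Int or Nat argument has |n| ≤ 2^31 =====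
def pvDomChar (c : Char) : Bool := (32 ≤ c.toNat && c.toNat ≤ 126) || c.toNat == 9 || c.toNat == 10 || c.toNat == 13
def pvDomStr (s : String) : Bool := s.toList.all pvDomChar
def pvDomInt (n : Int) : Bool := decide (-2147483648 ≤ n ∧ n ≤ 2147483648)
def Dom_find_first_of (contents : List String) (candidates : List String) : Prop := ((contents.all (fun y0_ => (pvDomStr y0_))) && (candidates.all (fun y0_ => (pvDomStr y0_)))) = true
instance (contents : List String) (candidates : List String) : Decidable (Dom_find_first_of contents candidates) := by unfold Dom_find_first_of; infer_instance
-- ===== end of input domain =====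

-- B inverts the traversal: a single pass over contents keeping the lowest-ranked candidate match (objective: alternative).

-- ===== PORT A =====
-- for c in candidates: i = contents.index(c) (or -1 on ValueError); if i >= 0: return (c, i); finally (None, -1)
def find_first_of (contents : List String) (candidates : List String) : Option String × Int :=
  match candidates with
  | [] => (none, -1)
  | c :: rest =>
    let i : Int := match PySem.List.index? contents c with
      | some n => (n : Int)
      | none => -1
    if 0 ≤ i then (some c, i) else find_first_of contents rest

-- ===== PORT B =====
-- rank = {}; for r, c in enumerate(candidates): rank.setdefault(c, r)
def pvRank (candidates : List String) : PySem.Dict String Int :=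
  (PySem.List.enumerate candidates 0).foldl (fun d p => d.setdefault p.2 p.1) PySem.Dict.empty

-- one step of the scan over contents: r = rank.get(x); if r is not None and r < best_rank: update
def pvStep (rank : PySem.Dict String Int) (st : Int × (Option String × Int)) (p : Int × String) :
    Int × (Option String × Int) :=
  match rank.get? p.2 with
  | some r => if r < st.1 then (r, (some p.2, p.1)) else st
  | none => st

def find_first_of_alt (contents : List String) (candidates : List String) : Option String × Int :=
  ((PySem.List.enumerate contents 0).foldl (pvStep (pvRank candidates))
    ((candidates.length : Int), (none, -1))).2

-- ===== PRECONDITION & SPEC =====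
def Spec_find_first_of (contents : List String) (candidates : List String) (out : Option String × Int) : Prop := out = find_first_of_alt contents candidates
instance (contents : List String) (candidates : List String) (out : Option String × Int) : Decidable (Spec_find_first_of contents candidates out) := by unfold Spec_find_first_of; infer_instance

-- ===== CLAIM (what is proved, stated in full; the proofs are below) =====
def Claim_equal_find_first_of : Prop := ∀ (contents : List String) (candidates : List String), Dom_find_first_of contents candidates → Spec_find_first_of contents candidates (find_first_of contents candidates)

-- ===== LEMMAS AND PROOFS =====

-- the setdefault loop over enumerate builds exactly the first-index map
theorem pvFold_get? (cs : List String) (c : String) :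
    ∀ (d : PySem.Dict String Int) (s : Int),
    ((PySem.List.enumerate cs s).foldl (fun d p => d.setdefault p.2 p.1) d).get? c =
      match d.get? c with
      | some v => some v
      | none => (PySem.List.index? cs c).map (fun n => s + (n : Int)) := by
  induction cs with
  | nil => intro d s; simp [PySem.List.enumerate]; cases d.get? c <;> simp
  | cons x xs ih =>
    intro d s
    rw [PySem.List.enumerate_cons]
    simp only [List.foldl_cons]
    rw [ih]
    by_cases hcx : c = x
    · subst hcx
      rw [PySem.Dict.get?_setdefault_self, PySem.List.index?_cons_self]
      cases h : d.get? c <;> simp [h]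
    · have h1 : (d.setdefault x s).get? c = d.get? c := by
        cases hc : d.contains x with
        | true => rw [PySem.Dict.setdefault_of_contains d s hc]
        | false =>
          rw [PySem.Dict.setdefault_of_not_contains d s hc]
          exact PySem.Dict.get?_insert_of_ne d s hcx
      rw [h1]
      cases h : d.get? c with
      | some v => rfl
      | none =>
        rw [PySem.List.index?_cons_of_ne xs (Ne.symm hcx)]
        cases PySem.List.index? xs c with
        | none => rfl
        | some n => simp; ring

theorem pvRank_get? (candidates : List String) (x : String) :
    (pvRank candidates).get? x = (PySem.List.index? candidates x).map (fun n => (n : Int)) := by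
  unfold pvRank
  rw [pvFold_get? candidates x PySem.Dict.empty 0]
  simp [PySem.Dict.get?_empty]

-- abstract step: pvStep with the rank dict replaced by index? into candidates
def gStep (cs : List String) (st : Int × (Option String × Int)) (p : Int × String) :
    Int × (Option String × Int) :=
  match (PySem.List.index? cs p.2).map (fun n => (n : Int)) with
  | some r => if r < st.1 then (r, (some p.2, p.1)) else st
  | none => st

theorem pvStep_eq_gStep (cs : List String) : pvStep (pvRank cs) = gStep cs := by
  funext st p
  unfold pvStep gStep
  rw [pvRank_get?]

-- once the bound is ≤ 0 nothing updates (ranks are nonnegative)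
theorem fold_gStep_nonpos (cs : List String) :
    ∀ (l : List (Int × String)) (st : Int × (Option String × Int)), st.1 ≤ 0 →
      l.foldl (gStep cs) st = st := by
  intro l
  induction l with
  | nil => intro st _; rfl
  | cons p l ih =>
    intro st hst
    simp only [List.foldl_cons]
    have hstep : gStep cs st p = st := by
      unfold gStep
      cases h : (PySem.List.index? cs p.2).map (fun n => (n : Int)) with
      | none => rfl
      | some r =>
        have hr : 0 ≤ r := by
          cases hi : PySem.List.index? cs p.2 with
          | none => rw [hi] at h; simp at h
          | some n => rw [hi] at h; simp at h; omega
        have : ¬ r < st.1 := by omega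
        simp [this]
    rw [hstep]; exact ih st hst

-- with an empty candidate list every lookup misses
theorem fold_gStep_nil :
    ∀ (l : List (Int × String)) (st : Int × (Option String × Int)),
      l.foldl (gStep []) st = st := by
  intro l
  induction l with
  | nil => intro st; rfl
  | cons p l ih =>
    intro st
    simp only [List.foldl_cons]
    have : gStep [] st p = st := by
      unfold gStep; rw [PySem.List.index?_eq_idxOf?]; simp
    rw [this]; exact ih st

-- if the head candidate occurs in contents at (first) position n, the scan returns it
theorem fold_gStep_hit (c : String) (rest : List String) :
    ∀ (contents : List String) (n : Nat) (s : Int) (st : Int × (Option String × Int)),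
      0 < st.1 → PySem.List.index? contents c = some n →
      ((PySem.List.enumerate contents s).foldl (gStep (c :: rest)) st).2 = (some c, s + (n : Int)) := by
  intro contents
  induction contents with
  | nil => intro n s st _ h; rw [PySem.List.index?_eq_idxOf?] at h; simp at h
  | cons x xs ih =>
    intro n s st hst h
    rw [PySem.List.enumerate_cons]
    simp only [List.foldl_cons]
    by_cases hxc : x = c
    · subst hxc
      rw [PySem.List.index?_cons_self] at h
      injection h with hn; subst hn
      have hstep : gStep (x :: rest) st (s, x) = (0, (some x, s)) := by
        unfold gStep
        rw [PySem.List.index?_cons_self]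
        simp [hst]
      rw [hstep, fold_gStep_nonpos _ _ _ (by simp)]
      simp
    · rw [PySem.List.index?_cons_of_ne xs hxc] at h
      cases hm : PySem.List.index? xs c with
      | none => rw [hm] at h; simp at h
      | some m =>
        rw [hm] at h; simp at h
        have hstep : ∃ st', gStep (c :: rest) st (s, x) = st' ∧ 0 < st'.1 := by
          unfold gStep
          cases hr : (PySem.List.index? (c :: rest) x).map (fun n => (n : Int)) with
          | none => exact ⟨st, rfl, hst⟩
          | some r =>
            have hrpos : 0 < r := by
              rw [PySem.List.index?_cons_of_ne rest (fun he => hxc he.symm)] at hr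
              cases hk : PySem.List.index? rest x with
              | none => rw [hk] at hr; simp at hr
              | some k => rw [hk] at hr; simp at hr; omega
            by_cases hlt : r < st.1
            · exact ⟨(r, (some x, s)), by simp [hlt], hrpos⟩
            · exact ⟨st, by simp [hlt], hst⟩
        obtain ⟨st', hst', hpos⟩ := hstep
        rw [hst', ih m (s + 1) st' hpos hm]
        have : s + 1 + (m : Int) = s + ((n : Nat) : Int) := by omega
        rw [this]

-- if c does not occur in contents, scanning with c :: rest from bound br+1
-- shadows scanning with rest from bound br (ranks are shifted by one)
theorem fold_gStep_shift (c : String) (rest : List String) :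
    ∀ (contents : List String), c ∉ contents →
    ∀ (s br : Int) (b : Option String × Int),
      (PySem.List.enumerate contents s).foldl (gStep (c :: rest)) (br + 1, b) =
        (let st := (PySem.List.enumerate contents s).foldl (gStep rest) (br, b)
         (st.1 + 1, st.2)) := by
  intro contents
  induction contents with
  | nil => intro _ s br b; simp [PySem.List.enumerate]
  | cons x xs ih =>
    intro hmem s br b
    have hxc : x ≠ c := fun he => hmem (by simp [he])
    have hxs : c ∉ xs := fun hm => hmem (by simp [hm])
    rw [PySem.List.enumerate_cons]
    simp only [List.foldl_cons]
    have hrw : PySem.List.index? (c :: rest) x = (PySem.List.index? rest x).map (· + 1) :=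
      PySem.List.index?_cons_of_ne rest (fun he => hxc he.symm)
    cases hk : PySem.List.index? rest x with
    | none =>
      have h1 : gStep (c :: rest) (br + 1, b) (s, x) = (br + 1, b) := by
        unfold gStep; rw [hrw, hk]; rfl
      have h2 : gStep rest (br, b) (s, x) = (br, b) := by
        unfold gStep; rw [hk]; rfl
      rw [h1, h2]; exact ih hxs (s + 1) br b
    | some k =>
      have h1 : gStep (c :: rest) (br + 1, b) (s, x) =
          (if ((k : Int) + 1) < br + 1 then (((k : Int) + 1), (some x, s)) else (br + 1, b)) := by
        unfold gStep; rw [hrw, hk]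
        simp only [Option.map_some]
        rfl
      have h2 : gStep rest (br, b) (s, x) =
          (if (k : Int) < br then ((k : Int), (some x, s)) else (br, b)) := by
        unfold gStep; rw [hk]; simp
      rw [h1, h2]
      by_cases hlt : (k : Int) < br
      · have : ((k : Int) + 1) < br + 1 := by omega
        simp only [hlt, this, if_pos]
        exact ih hxs (s + 1) (k : Int) (some x, s)
      · have : ¬ ((k : Int) + 1) < br + 1 := by omega
        simp only [hlt, this, if_false]
        exact ih hxs (s + 1) br b

-- ===== VERDICT (by name: the statement is the Claim_ definition above) =====
theorem find_first_of_spec : Claim_equal_find_first_of := by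
  intro contents candidates hd
  clear hd
  unfold Spec_find_first_of find_first_of_alt
  rw [pvStep_eq_gStep]
  induction candidates with
  | nil => rw [fold_gStep_nil]; rfl
  | cons c rest ih =>
    rw [find_first_of]
    cases h : PySem.List.index? contents c with
    | some n =>
      have hb : (0 : Int) < ((c :: rest).length : Int) := by simp
      rw [fold_gStep_hit c rest contents n 0 _ hb h]
      simp
    | none =>
      have hb : ((c :: rest).length : Int) = ((rest.length : Int)) + 1 := by simp
      have hmem : c ∉ contents := by
        rw [PySem.List.index?_eq_idxOf?] at h
        intro hm
        exact absurd h (by simp [List.idxOf?_eq_none_iff] at *; simp_all)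
      rw [hb, fold_gStep_shift c rest contents hmem 0 (rest.length : Int) (none, -1)]
      simpa using ih
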